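-- pv_equiv track=rewrite | github.com/ym1522/Algorithm-study | 김수빈/baekjoon/2798_bj.py | solution
-- ===== SOURCE A (Python) =====
-- def solution(N, M, cards):
--     cards.sort()
--     i, j, k = N - 3, N - 2, N - 1
--     answer = None
--     for i in range(N - 3, -1, -1):
--         j = i + 1
--         k = N - 1
--         while j < k:
--             sum_val = cards[i] + cards[j] + cards[k]
--             if sum_val > M:
--                 k -= 1
--             elif sum_val == M: return M
--             else:
--                 answer = sum_val if answer is None or M - sum_val < M - answer else answer
--                 j += 1
--     return answer
-- ===== SOURCE B (Python) =====
-- def solution(N, M, cards):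
--     cards.sort()
--     best = None
--     for a in range(N - 2):
--         for b in range(a + 1, N - 1):
--             for c in range(b + 1, N):
--                 s = cards[a] + cards[b] + cards[c]
--                 if s <= M and (best is None or s > best):
--                     best = s
--     return best
-- ===== Notes on version B (the rewrite author's own statement) =====
-- stated objective: simpler
-- what changed: Replaces the descending two-pointer sweep with early return by a plain brute-force enumeration of all index triples a<b<c<N, tracking the maximum sum that is <= M.
import Mathlib
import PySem

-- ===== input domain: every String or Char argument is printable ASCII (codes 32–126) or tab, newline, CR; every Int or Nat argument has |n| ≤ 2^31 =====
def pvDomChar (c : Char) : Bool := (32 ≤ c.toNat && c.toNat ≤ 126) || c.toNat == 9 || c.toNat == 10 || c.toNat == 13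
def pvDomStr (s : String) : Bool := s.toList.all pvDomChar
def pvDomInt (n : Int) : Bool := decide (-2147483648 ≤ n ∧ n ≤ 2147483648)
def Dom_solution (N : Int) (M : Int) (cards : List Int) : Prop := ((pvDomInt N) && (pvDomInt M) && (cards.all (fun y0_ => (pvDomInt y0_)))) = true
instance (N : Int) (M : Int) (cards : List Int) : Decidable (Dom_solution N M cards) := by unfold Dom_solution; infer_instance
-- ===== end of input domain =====

-- B replaces A's two-pointer sweep (with early return on an exact hit) by a plain brute-force
-- enumeration of all index triples a<b<c<N tracking the best sum ≤ M: simpler, not faster.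
-- A and B both sort `cards` in place (identical mutation); the theorems are about the return value.

-- ===== PORT A =====
-- inner `while j < k` loop; Sum.inl = early `return M`, Sum.inr = fall through with answer
def solWhile (L : List Int) (M i : Int) (j k : Int) (answer : Option Int) : Option Int ⊕ Option Int :=
  if _h : j < k then
    match PySem.List.pyGet? L i, PySem.List.pyGet? L j, PySem.List.pyGet? L k with
    | some a, some b, some c =>
      let sum_val := a + b + c
      if sum_val > M then solWhile L M i j (k - 1) answer
      else if sum_val = M then Sum.inl (some M)
      else
        solWhile L M i (j + 1) k
          (some (match answer with
                 | none => sum_val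
                 | some ans => if M - sum_val < M - ans then sum_val else ans))
    | _, _, _ => Sum.inr answer  -- Python raises IndexError here; unreachable under Pre_
  else Sum.inr answer
termination_by (k - j).toNat
decreasing_by all_goals omega

-- outer `for i in range(N-3, -1, -1)` loop
def solFor (L : List Int) (M N : Int) : List Int → Option Int → Option Int
  | [], answer => answer
  | i :: rest, answer =>
    match solWhile L M i (i + 1) (N - 1) answer with
    | Sum.inl r => r
    | Sum.inr answer' => solFor L M N rest answer'

def solution (N : Int) (M : Int) (cards : List Int) : Option Int :=
  let L := PySem.List.sorted cards (fun x => x) false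
  solFor L M N (PySem.List.pyRange (N - 3) (-1) (-1)) none

-- ===== PORT B =====
-- `if s <= M and (best is None or s > best): best = s`
def updB (M : Int) (best : Option Int) (s : Int) : Option Int :=
  match best with
  | none => if s ≤ M then some s else none
  | some bs => if s ≤ M ∧ bs < s then some s else some bs

def solution_alt (N : Int) (M : Int) (cards : List Int) : Option Int :=
  let L := PySem.List.sorted cards (fun x => x) false
  (PySem.List.pyRange 0 (N - 2) 1).foldl (fun best a =>
    (PySem.List.pyRange (a + 1) (N - 1) 1).foldl (fun best b =>
      (PySem.List.pyRange (b + 1) N 1).foldl (fun best c =>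
        updB M best (PySem.List.pyGetD L a 0 + PySem.List.pyGetD L b 0 + PySem.List.pyGetD L c 0))
        best) best) none

-- ===== PRECONDITION & SPEC =====
-- Pre_ excludes exactly the inputs where A raises IndexError: N ≥ 3 together with N > len(cards)
def Pre_solution (N : Int) (M : Int) (cards : List Int) : Prop :=
  N ≤ (cards.length : Int) ∨ N < 3
instance (N : Int) (M : Int) (cards : List Int) : Decidable (Pre_solution N M cards) := by
  unfold Pre_solution; infer_instance

def pvWitness_solution : Int × Int × List Int := (4, 21, [5, 6, 7, 8])

def Spec_solution (N : Int) (M : Int) (cards : List Int) (out : Option Int) : Prop := out = solution_alt N M cards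
instance (N : Int) (M : Int) (cards : List Int) (out : Option Int) : Decidable (Spec_solution N M cards out) := by unfold Spec_solution; infer_instance

-- ===== CLAIM (what is proved, stated in full; the proofs are below) =====
def Claim_equal_solution : Prop := ∀ (N : Int) (M : Int) (cards : List Int), Dom_solution N M cards → Pre_solution N M cards → Spec_solution N M cards (solution N M cards)

-- ===== LEMMAS AND PROOFS =====

-- abbreviation for the (sorted) card at an integer index, as port B reads it
def fIdx (L : List Int) (t : Int) : Int := PySem.List.pyGetD L t 0

-- `v` is a sum of a valid triple and fits under M
def Good (L : List Int) (N M v : Int) : Prop :=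
  v ≤ M ∧ ∃ a b c : Int, 0 ≤ a ∧ a < b ∧ b < c ∧ c < N ∧ v = fIdx L a + fIdx L b + fIdx L c

-- `r` is the maximum Good value (none if there is none)
def MaxGood (L : List Int) (N M : Int) (r : Option Int) : Prop :=
  match r with
  | none => ∀ v, ¬ Good L N M v
  | some v => Good L N M v ∧ ∀ w, Good L N M w → w ≤ v

lemma MaxGood_unique {L : List Int} {N M : Int} {r r' : Option Int}
    (h : MaxGood L N M r) (h' : MaxGood L N M r') : r = r' := by
  cases r with
  | none => cases r' with
    | none => rfl
    | some v => exact absurd h'.1 (h v)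
  | some v => cases r' with
    | none => exact absurd h.1 (h' v)
    | some w =>
      have := h.2 w h'.1
      have := h'.2 v h.1
      simp; omega

lemma fIdx_mono {L : List Int} (hs : L.Pairwise (· ≤ ·)) {s t : Int}
    (h0 : 0 ≤ s) (hst : s ≤ t) (ht : t < (L.length : Int)) : fIdx L s ≤ fIdx L t := by
  rcases eq_or_lt_of_le hst with rfl | hlt
  · exact le_refl _
  · have hsl : s < (L.length : Int) := lt_trans hlt ht
    have h0t : (0:Int) ≤ t := le_trans h0 hst
    rw [fIdx, fIdx, PySem.List.pyGetD_eq_getElem L 0 h0 hsl, PySem.List.pyGetD_eq_getElem L 0 h0t ht]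
    exact (List.pairwise_iff_getElem.mp hs) s.toNat t.toNat (by omega) (by omega) (by omega)

lemma pyGet?_fIdx {L : List Int} {t : Int} (h0 : 0 ≤ t) (ht : t < (L.length : Int)) :
    PySem.List.pyGet? L t = some (fIdx L t) := by
  rw [PySem.List.pyGet?_eq_some_getElem L h0 ht, fIdx, PySem.List.pyGetD_eq_getElem L 0 h0 ht]

-- ---- A side ----

lemma solWhile_spec (L : List Int) (N M : Int) (hs : L.Pairwise (· ≤ ·))
    (hN : N ≤ (L.length : Int)) :
    ∀ (j k : Int) (i : Int) (ans : Option Int),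
    0 ≤ i → i < j → j ≤ k → k ≤ N - 1 →
    (∀ k', k < k' → k' < N → ¬ (fIdx L i + fIdx L j + fIdx L k' ≤ M)) →
    (∀ j' k', i < j' → j' < j → j' < k' → k' < N → fIdx L i + fIdx L j' + fIdx L k' ≤ M →
        ∃ a, ans = some a ∧ fIdx L i + fIdx L j' + fIdx L k' ≤ a) →
    (∀ a, ans = some a → Good L N M a) →
    (match solWhile L M i j k ans with
     | Sum.inl r => r = some M ∧ Good L N M M
     | Sum.inr ans' =>
        (∀ j' k', i < j' → j' < k' → k' < N → fIdx L i + fIdx L j' + fIdx L k' ≤ M →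
            ∃ a, ans' = some a ∧ fIdx L i + fIdx L j' + fIdx L k' ≤ a)
        ∧ (∀ a, ans' = some a → Good L N M a)
        ∧ (∀ a, ans = some a → ∃ b, ans' = some b ∧ a ≤ b)) := by
  suffices H : ∀ (n : Nat) (j k i : Int) (ans : Option Int), (k - j).toNat ≤ n →
      0 ≤ i → i < j → j ≤ k → k ≤ N - 1 →
      (∀ k', k < k' → k' < N → ¬ (fIdx L i + fIdx L j + fIdx L k' ≤ M)) →
      (∀ j' k', i < j' → j' < j → j' < k' → k' < N → fIdx L i + fIdx L j' + fIdx L k' ≤ M →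
          ∃ a, ans = some a ∧ fIdx L i + fIdx L j' + fIdx L k' ≤ a) →
      (∀ a, ans = some a → Good L N M a) →
      (match solWhile L M i j k ans with
       | Sum.inl r => r = some M ∧ Good L N M M
       | Sum.inr ans' =>
          (∀ j' k', i < j' → j' < k' → k' < N → fIdx L i + fIdx L j' + fIdx L k' ≤ M →
              ∃ a, ans' = some a ∧ fIdx L i + fIdx L j' + fIdx L k' ≤ a)
          ∧ (∀ a, ans' = some a → Good L N M a)
          ∧ (∀ a, ans = some a → ∃ b, ans' = some b ∧ a ≤ b)) by
    intro j k i ans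
    exact H (k - j).toNat j k i ans le_rfl
  intro n
  induction n with
  | zero =>
    intro j k i ans hfuel h0i hij hjk hkN Hskip Hcover Hgood
    have hnlt : ¬ j < k := by omega
    rw [solWhile, dif_neg hnlt]
    refine ⟨?_, Hgood, fun a ha => ⟨a, ha, le_refl a⟩⟩
    intro j' k' hij' hj'k' hk'N hsum
    by_cases hj'j : j' < j
    · exact Hcover j' k' hij' hj'j hj'k' hk'N hsum
    · exfalso
      have hfj : fIdx L j ≤ fIdx L j' :=
        fIdx_mono hs (by omega) (by omega) (by omega)
      exact Hskip k' (by omega) hk'N (by omega)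
  | succ n ih =>
    intro j k i ans hfuel h0i hij hjk hkN Hskip Hcover Hgood
    by_cases hlt : j < k
    · have h0j : (0:Int) ≤ j := by omega
      have h0k : (0:Int) ≤ k := by omega
      have hiL : i < (L.length : Int) := by omega
      have hjL : j < (L.length : Int) := by omega
      have hkL : k < (L.length : Int) := by omega
      rw [solWhile, dif_pos hlt, pyGet?_fIdx h0i hiL, pyGet?_fIdx h0j hjL, pyGet?_fIdx h0k hkL]
      simp only []
      by_cases hgt : fIdx L i + fIdx L j + fIdx L k > M
      · rw [if_pos hgt]
        refine ih j (k - 1) i ans (by omega) h0i hij (by omega) (by omega) ?_ Hcover Hgood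
        intro k' hk' hk'N
        by_cases hkk : k' = k
        · subst hkk; omega
        · exact Hskip k' (by omega) hk'N
      · rw [if_neg hgt]
        by_cases heq : fIdx L i + fIdx L j + fIdx L k = M
        · rw [if_pos heq]
          exact ⟨rfl, le_refl M, i, j, k, h0i, hij, hlt, by omega, heq.symm⟩
        · rw [if_neg heq]
          have hsM : fIdx L i + fIdx L j + fIdx L k < M := by omega
          have hcont : ∀ v2 : Int,
              fIdx L i + fIdx L j + fIdx L k ≤ v2 → (∀ a, ans = some a → a ≤ v2) →
              Good L N M v2 →
              (match solWhile L M i (j + 1) k (some v2) with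
               | Sum.inl r => r = some M ∧ Good L N M M
               | Sum.inr ans' =>
                  (∀ j' k', i < j' → j' < k' → k' < N →
                      fIdx L i + fIdx L j' + fIdx L k' ≤ M →
                      ∃ a, ans' = some a ∧ fIdx L i + fIdx L j' + fIdx L k' ≤ a)
                  ∧ (∀ a, ans' = some a → Good L N M a)
                  ∧ (∀ a, ans = some a → ∃ b, ans' = some b ∧ a ≤ b)) := by
            intro v2 hv2s hv2a hv2good
            have hskip' : ∀ k', k < k' → k' < N →
                ¬ (fIdx L i + fIdx L (j + 1) + fIdx L k' ≤ M) := by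
              intro k' hk' hk'N
              have hfj : fIdx L j ≤ fIdx L (j + 1) :=
                fIdx_mono hs h0j (by omega) (by omega)
              have := Hskip k' hk' hk'N
              omega
            have hcover' : ∀ j' k', i < j' → j' < j + 1 → j' < k' → k' < N →
                fIdx L i + fIdx L j' + fIdx L k' ≤ M →
                ∃ a, (some v2 : Option Int) = some a ∧ fIdx L i + fIdx L j' + fIdx L k' ≤ a := by
              intro j' k' hij' hj'j1 hj'k' hk'N hsum
              refine ⟨v2, rfl, ?_⟩
              by_cases hj'j : j' < j
              · obtain ⟨a, ha, hle⟩ := Hcover j' k' hij' hj'j hj'k' hk'N hsum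
                exact le_trans hle (hv2a a ha)
              · have hj'eq : j' = j := by omega
                subst hj'eq
                by_cases hk'k : k' ≤ k
                · have hfk : fIdx L k' ≤ fIdx L k :=
                    fIdx_mono hs (by omega) hk'k (by omega)
                  omega
                · exact absurd hsum (Hskip k' (by omega) hk'N)
            have hgood' : ∀ a, (some v2 : Option Int) = some a → Good L N M a := by
              intro a ha
              cases ha
              exact hv2good
            have hres := ih (j + 1) k i (some v2) (by omega) h0i (by omega) (by omega) hkN
              hskip' hcover' hgood'
            revert hres
            cases solWhile L M i (j + 1) k (some v2) with
            | inl r => exact id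
            | inr ans' =>
              rintro ⟨hc, hg, hm⟩
              refine ⟨hc, hg, fun a ha => ?_⟩
              obtain ⟨b, hb, hvb⟩ := hm v2 rfl
              exact ⟨b, hb, le_trans (hv2a a ha) hvb⟩
          cases ans with
          | none =>
            dsimp only
            exact hcont _ (le_refl _) (by simp)
              ⟨by omega, i, j, k, h0i, hij, hlt, by omega, rfl⟩
          | some a =>
            dsimp only
            by_cases h : M - (fIdx L i + fIdx L j + fIdx L k) < M - a
            · rw [if_pos h]
              exact hcont _ (le_refl _) (fun a' ha' => by cases ha'; omega)
                ⟨by omega, i, j, k, h0i, hij, hlt, by omega, rfl⟩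
            · rw [if_neg h]
              exact hcont _ (by omega) (fun a' ha' => by cases ha'; omega) (Hgood a rfl)
    · rw [solWhile, dif_neg hlt]
      refine ⟨?_, Hgood, fun a ha => ⟨a, ha, le_refl a⟩⟩
      intro j' k' hij' hj'k' hk'N hsum
      by_cases hj'j : j' < j
      · exact Hcover j' k' hij' hj'j hj'k' hk'N hsum
      · exfalso
        have hfj : fIdx L j ≤ fIdx L j' :=
          fIdx_mono hs (by omega) (by omega) (by omega)
        exact Hskip k' (by omega) hk'N (by omega)

lemma solFor_spec (L : List Int) (N M : Int) (hs : L.Pairwise (· ≤ ·))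
    (hN : N ≤ (L.length : Int)) :
    ∀ (i0 : Int) (ans : Option Int), i0 ≤ N - 3 →
    (∀ a b c : Int, i0 < a → a < b → b < c → c < N → fIdx L a + fIdx L b + fIdx L c ≤ M →
        ∃ v, ans = some v ∧ fIdx L a + fIdx L b + fIdx L c ≤ v) →
    (∀ v, ans = some v → Good L N M v) →
    MaxGood L N M (solFor L M N (PySem.List.pyRange i0 (-1) (-1)) ans) := by
  have full : ∀ (ans : Option Int),
      (∀ a b c : Int, 0 ≤ a → a < b → b < c → c < N → fIdx L a + fIdx L b + fIdx L c ≤ M →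
          ∃ v, ans = some v ∧ fIdx L a + fIdx L b + fIdx L c ≤ v) →
      (∀ v, ans = some v → Good L N M v) → MaxGood L N M ans := by
    intro ans Hfull Hgood
    cases hans : ans with
    | none =>
      intro v ⟨hvM, a, b, c, ha0, hab, hbc, hcN, hv⟩
      obtain ⟨w, hw, _⟩ := Hfull a b c ha0 hab hbc hcN (by omega)
      rw [hans] at hw; cases hw
    | some v =>
      refine ⟨Hgood v hans, ?_⟩
      intro w ⟨hwM, a, b, c, ha0, hab, hbc, hcN, hw⟩
      obtain ⟨w', hw', hle⟩ := Hfull a b c ha0 hab hbc hcN (by omega)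
      rw [hans] at hw'; cases hw'; omega
  suffices H : ∀ (n : Nat) (i0 : Int) (ans : Option Int), (i0 + 1).toNat ≤ n → i0 ≤ N - 3 →
      (∀ a b c : Int, i0 < a → a < b → b < c → c < N → fIdx L a + fIdx L b + fIdx L c ≤ M →
          ∃ v, ans = some v ∧ fIdx L a + fIdx L b + fIdx L c ≤ v) →
      (∀ v, ans = some v → Good L N M v) →
      MaxGood L N M (solFor L M N (PySem.List.pyRange i0 (-1) (-1)) ans) by
    intro i0 ans
    exact H (i0 + 1).toNat i0 ans le_rfl
  intro n
  induction n with
  | zero =>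
    intro i0 ans hfuel hi0 Hcover Hgood
    rw [PySem.List.pyRange_neg_one_eq_nil (by omega : i0 ≤ -1)]
    exact full ans (fun a b c ha0 hab hbc hcN hsum =>
      Hcover a b c (by omega) hab hbc hcN hsum) Hgood
  | succ n ih =>
    intro i0 ans hfuel hi0 Hcover Hgood
    by_cases hneg : i0 ≤ -1
    · rw [PySem.List.pyRange_neg_one_eq_nil hneg]
      exact full ans (fun a b c ha0 hab hbc hcN hsum =>
        Hcover a b c (by omega) hab hbc hcN hsum) Hgood
    · rw [PySem.List.pyRange_neg_one_cons (by omega : (-1:Int) < i0)]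
      simp only [solFor]
      have hspec := solWhile_spec L N M hs hN (i0 + 1) (N - 1) i0 ans (by omega)
        (by omega) (by omega) (by omega)
        (fun k' hk' hk'N => absurd hk'N (by omega))
        (fun j' k' hij' hj'j _ _ _ => absurd hj'j (by omega))
        Hgood
      revert hspec
      cases solWhile L M i0 (i0 + 1) (N - 1) ans with
      | inl r =>
        rintro ⟨rfl, hgoodM⟩
        exact ⟨hgoodM, fun w hw => hw.1⟩
      | inr ans' =>
        rintro ⟨hc, hg, hm⟩
        refine ih (i0 - 1) ans' (by omega) (by omega) ?_ hg
        intro a b c hia hab hbc hcN hsum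
        by_cases hai : a = i0
        · subst hai
          exact hc b c hab hbc hcN hsum
        · obtain ⟨v, hv, hle⟩ := Hcover a b c (by omega) hab hbc hcN hsum
          obtain ⟨w, hw, hvw⟩ := hm v hv
          exact ⟨w, hw, by omega⟩

-- ---- B side ----

def MaxInv (M : Int) (cs : List Int) (b0 r : Option Int) : Prop :=
  (∀ s ∈ cs, s ≤ M → ∃ v, r = some v ∧ s ≤ v)
  ∧ (∀ a, b0 = some a → ∃ v, r = some v ∧ a ≤ v)
  ∧ (∀ v, r = some v → (v ∈ cs ∧ v ≤ M) ∨ b0 = some v)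

lemma updB_ge_old (M : Int) (b0 : Option Int) (s a : Int) (h : b0 = some a) :
    ∃ v, updB M b0 s = some v ∧ a ≤ v := by
  subst h
  simp only [updB]
  split_ifs with h1
  · exact ⟨s, rfl, le_of_lt h1.2⟩
  · exact ⟨a, rfl, le_refl a⟩

lemma updB_ge_new (M : Int) (b0 : Option Int) (s : Int) (h : s ≤ M) :
    ∃ v, updB M b0 s = some v ∧ s ≤ v := by
  cases b0 with
  | none => exact ⟨s, by simp [updB, h], le_refl s⟩
  | some bs =>
    simp only [updB]
    split_ifs with h1
    · exact ⟨s, rfl, le_refl s⟩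
    · exact ⟨bs, rfl, by omega⟩

lemma updB_src (M : Int) (b0 : Option Int) (s v : Int) (h : updB M b0 s = some v) :
    (v = s ∧ v ≤ M) ∨ b0 = some v := by
  cases b0 with
  | none =>
    simp only [updB] at h
    split_ifs at h with h1
    left; cases h; exact ⟨rfl, h1⟩
  | some bs =>
    simp only [updB] at h
    split_ifs at h with h1
    · left; cases h; exact ⟨rfl, h1.1⟩
    · right; cases h; rfl

lemma foldl_updB_spec (M : Int) : ∀ (cs : List Int) (b0 : Option Int),
    MaxInv M cs b0 (cs.foldl (updB M) b0) := by
  intro cs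
  induction cs with
  | nil =>
    intro b0
    refine ⟨by simp, fun a h => ⟨a, h, le_refl a⟩, fun v h => Or.inr h⟩
  | cons s t ih =>
    intro b0
    obtain ⟨ih1, ih2, ih3⟩ := ih (updB M b0 s)
    refine ⟨?_, ?_, ?_⟩
    · intro x hx hxM
      rcases List.mem_cons.mp hx with rfl | hxt
      · obtain ⟨v1, hv1, hle1⟩ := updB_ge_new M b0 x hxM
        obtain ⟨v, hv, hle⟩ := ih2 v1 hv1
        exact ⟨v, hv, le_trans hle1 hle⟩
      · exact ih1 x hxt hxM
    · intro a ha
      obtain ⟨v1, hv1, hle1⟩ := updB_ge_old M b0 s a ha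
      obtain ⟨v, hv, hle⟩ := ih2 v1 hv1
      exact ⟨v, hv, le_trans hle1 hle⟩
    · intro v hv
      rcases ih3 v hv with ⟨hvt, hvM⟩ | hup
      · exact Or.inl ⟨List.mem_cons_of_mem _ hvt, hvM⟩
      · rcases updB_src M b0 s v hup with ⟨rfl, hvM⟩ | hb0
        · exact Or.inl ⟨List.mem_cons_self, hvM⟩
        · exact Or.inr hb0

lemma foldl_nest {α : Type} (u : Option α → Int → Option α) (g : Int → List Int) :
    ∀ (l : List Int) (b0 : Option α),
    l.foldl (fun st a => (g a).foldl u st) b0 = (l.flatMap g).foldl u b0 := by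
  intro l
  induction l with
  | nil => intro b0; simp
  | cons x t ih => intro b0; simp [List.foldl_append, ih]

def sumsOf (L : List Int) (N : Int) : List Int :=
  (PySem.List.pyRange 0 (N - 2) 1).flatMap (fun a =>
    (PySem.List.pyRange (a + 1) (N - 1) 1).flatMap (fun b =>
      (PySem.List.pyRange (b + 1) N 1).map (fun c => fIdx L a + fIdx L b + fIdx L c)))

lemma mem_sumsOf {L : List Int} {N s : Int} :
    s ∈ sumsOf L N ↔ ∃ a b c : Int, 0 ≤ a ∧ a < b ∧ b < c ∧ c < N ∧
      s = fIdx L a + fIdx L b + fIdx L c := by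
  simp only [sumsOf, List.mem_flatMap, List.mem_map, PySem.List.mem_pyRange_one]
  constructor
  · rintro ⟨a, ⟨ha0, haN⟩, b, ⟨hab, hbN⟩, c, ⟨hbc, hcN⟩, rfl⟩
    exact ⟨a, b, c, ha0, hab, hbc, hcN, rfl⟩
  · rintro ⟨a, b, c, ha0, hab, hbc, hcN, rfl⟩
    exact ⟨a, ⟨ha0, by omega⟩, b, ⟨by omega, by omega⟩, c, ⟨by omega, hcN⟩, rfl⟩

lemma solution_alt_eq_foldl (N M : Int) (cards : List Int) :
    solution_alt N M cards =
      (sumsOf (PySem.List.sorted cards (fun x => x) false) N).foldl (updB M) none := by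
  unfold solution_alt sumsOf
  rw [← foldl_nest (updB M)]
  apply List.foldl_ext
  intro st a _
  rw [← foldl_nest (updB M)]
  apply List.foldl_ext
  intro st' b _
  rw [List.foldl_map]
  simp only [fIdx]

lemma maxGood_solution_alt (N M : Int) (cards : List Int) :
    MaxGood (PySem.List.sorted cards (fun x => x) false) N M (solution_alt N M cards) := by
  set L := PySem.List.sorted cards (fun x => x) false with hL
  have h := foldl_updB_spec M (sumsOf L N) none
  rw [← solution_alt_eq_foldl] at h
  obtain ⟨h1, _, h3⟩ := h
  cases hr : solution_alt N M cards with
  | none =>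
    intro v ⟨hvM, a, b, c, ha0, hab, hbc, hcN, hv⟩
    have hmem : v ∈ sumsOf L N := mem_sumsOf.mpr ⟨a, b, c, ha0, hab, hbc, hcN, hv⟩
    obtain ⟨w, hw, _⟩ := h1 v hmem hvM
    rw [hr] at hw; cases hw
  | some v =>
    rw [hr] at h3 h1
    rcases h3 v rfl with ⟨hvmem, hvM⟩ | hnone
    · refine ⟨⟨hvM, mem_sumsOf.mp hvmem⟩, ?_⟩
      intro w ⟨hwM, a, b, c, ha0, hab, hbc, hcN, hw⟩
      obtain ⟨v', hv', hle⟩ := h1 w (mem_sumsOf.mpr ⟨a, b, c, ha0, hab, hbc, hcN, hw⟩) hwM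
      cases hv'; exact hle
    · cases hnone

lemma maxGood_solution (N M : Int) (cards : List Int)
    (hN : N ≤ ((PySem.List.sorted cards (fun x => x) false).length : Int)) (_h3 : 3 ≤ N) :
    MaxGood (PySem.List.sorted cards (fun x => x) false) N M (solution N M cards) := by
  set L := PySem.List.sorted cards (fun x => x) false with hL
  have hs : L.Pairwise (· ≤ ·) := PySem.List.sorted_pairwise cards (fun x => x)
  unfold solution
  exact solFor_spec L N M hs hN (N - 3) none le_rfl
    (fun a b c hia hab hbc hcN _ => absurd hcN (by omega))
    (fun v hv => by cases hv)

-- ===== VERDICT (by name: the statement is the Claim_ definition above) =====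
theorem solution_spec : Claim_equal_solution := by
  intro N M cards _ hpre
  unfold Spec_solution
  by_cases h3 : N < 3
  · have hA : solution N M cards = none := by
      unfold solution
      rw [PySem.List.pyRange_neg_one_eq_nil (by omega : N - 3 ≤ -1)]
      rfl
    have hB : solution_alt N M cards = none := by
      unfold solution_alt
      rw [PySem.List.pyRange_one_eq_nil (by omega : N - 2 ≤ 0)]
      rfl
    rw [hA, hB]
  · have hN : N ≤ ((PySem.List.sorted cards (fun x => x) false).length : Int) := by
      rw [PySem.List.length_sorted]
      rcases hpre with h | h
      · exact h
      · omega
    exact MaxGood_unique (maxGood_solution N M cards hN (by omega))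
      (maxGood_solution_alt N M cards)
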